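-- pv_equiv track=rewrite | github.com/cicl2018/semeval-2019-task-10 | simple_math/close_tag_sat/confident_answer.py | score_ans
-- ===== SOURCE A (Python) =====
-- def score_ans(cal_answer, target_ans):
--     score = 0
--     len_a = len(cal_answer)
--     len_b = len(target_ans)
--     if len_a < len_b:
--         shorter_len = len_a
--     else:
--         shorter_len = len_b
--
--     for i in range(0, shorter_len):
--         char_a = cal_answer[i]
--         char_b = target_ans[i]
--
--         if char_a != char_b:
--             score += shorter_len - i
--
--     return score
-- ===== SOURCE B (Python) =====
-- def score_ans(cal_answer, target_ans):
--     shorter_len = min(len(cal_answer), len(target_ans))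
--     score = 0
--     mismatches = 0
--     for i in range(shorter_len):
--         if cal_answer[i] != target_ans[i]:
--             mismatches += 1
--         score += mismatches
--     return score
-- ===== Notes on version B (the rewrite author's own statement) =====
-- stated objective: alternative
-- what changed: Replaces A's per-mismatch weight (shorter_len - i) by a running mismatch counter added to the score at every step, using the identity that each mismatch at position i contributes once per remaining iteration.
import Mathlib
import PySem

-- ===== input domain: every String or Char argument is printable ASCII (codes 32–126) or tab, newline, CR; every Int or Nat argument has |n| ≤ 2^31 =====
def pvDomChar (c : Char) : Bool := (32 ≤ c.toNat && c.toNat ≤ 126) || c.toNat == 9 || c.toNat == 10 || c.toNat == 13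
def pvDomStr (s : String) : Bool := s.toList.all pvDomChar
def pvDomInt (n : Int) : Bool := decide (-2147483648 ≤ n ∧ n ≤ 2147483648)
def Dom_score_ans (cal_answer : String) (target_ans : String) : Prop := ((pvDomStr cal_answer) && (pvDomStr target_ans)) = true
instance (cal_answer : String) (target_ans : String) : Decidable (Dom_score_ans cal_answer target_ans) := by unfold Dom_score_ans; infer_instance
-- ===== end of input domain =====

-- B replaces A's per-mismatch weight (shorter_len - i) by a running mismatch counter
-- added to the score at every iteration (alternative decomposition, same O(n) cost).

-- ===== PORT A =====
-- indexing cal_answer[i], target_ans[i] is always in range (i < shorter_len), so getD never hits its default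
def score_ans (cal_answer : String) (target_ans : String) : Int :=
  let a := cal_answer.toList
  let b := target_ans.toList
  let len_a := a.length
  let len_b := b.length
  let shorter_len := if len_a < len_b then len_a else len_b
  (List.range shorter_len).foldl
    (fun score i =>
      if a.getD i ' ' ≠ b.getD i ' ' then score + ((shorter_len : Int) - (i : Int)) else score) 0

-- ===== PORT B =====
def score_ans_alt (cal_answer : String) (target_ans : String) : Int :=
  let a := cal_answer.toList
  let b := target_ans.toList
  let shorter_len := Nat.min a.length b.length
  ((List.range shorter_len).foldl
    (fun (p : Int × Int) i =>
      let mm := if a.getD i ' ' ≠ b.getD i ' ' then p.2 + 1 else p.2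
      (p.1 + mm, mm)) (0, 0)).1

-- ===== PRECONDITION & SPEC =====
def Spec_score_ans (cal_answer : String) (target_ans : String) (out : Int) : Prop := out = score_ans_alt cal_answer target_ans
instance (cal_answer : String) (target_ans : String) (out : Int) : Decidable (Spec_score_ans cal_answer target_ans out) := by unfold Spec_score_ans; infer_instance

-- ===== CLAIM (what is proved, stated in full; the proofs are below) =====
def Claim_equal_score_ans : Prop := ∀ (cal_answer : String) (target_ans : String), Dom_score_ans cal_answer target_ans → Spec_score_ans cal_answer target_ans (score_ans cal_answer target_ans)

-- ===== LEMMAS AND PROOFS =====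

-- running mismatch count over the first n positions
def pvK (a b : List Char) (n : Nat) : Int :=
  ((List.range n).map (fun i => if a.getD i ' ' ≠ b.getD i ' ' then (1 : Int) else 0)).sum

-- A's weighted sum with explicit weight base c
def pvG (a b : List Char) (c : Int) (n : Nat) : Int :=
  ((List.range n).map (fun i => if a.getD i ' ' ≠ b.getD i ' ' then c - (i : Int) else 0)).sum

theorem pv_sum_map_add {α : Type} (f g : α → Int) (l : List α) :
    (l.map (fun x => f x + g x)).sum = (l.map f).sum + (l.map g).sum := by
  induction l with
  | nil => simp
  | cons x xs ih => simp [ih]; ring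

theorem pvG_succ_base (a b : List Char) (c : Int) (n : Nat) :
    pvG a b (c + 1) n = pvG a b c n + pvK a b n := by
  unfold pvG pvK
  rw [← pv_sum_map_add]
  congr 1
  apply List.map_congr_left
  intro i _
  split_ifs <;> ring

theorem pvG_succ (a b : List Char) (n : Nat) :
    pvG a b ((n : Int) + 1) (n + 1) = pvG a b (n : Int) n + pvK a b (n + 1) := by
  unfold pvG pvK
  rw [List.range_succ, List.map_append, List.map_append, List.sum_append, List.sum_append]
  have h := pvG_succ_base a b (n : Int) n
  unfold pvG pvK at h
  rw [h]
  simp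
  split_ifs <;> ring

-- A's fold equals the weighted sum
theorem pv_foldA (a b : List Char) (m : Nat) (l : List Nat) (s : Int) :
    l.foldl (fun score i =>
      if a.getD i ' ' ≠ b.getD i ' ' then score + ((m : Int) - (i : Int)) else score) s
    = s + (l.map (fun i => if a.getD i ' ' ≠ b.getD i ' ' then (m : Int) - (i : Int) else 0)).sum := by
  induction l generalizing s with
  | nil => simp
  | cons x xs ih =>
    simp only [List.foldl_cons, List.map_cons, List.sum_cons]
    rw [ih]
    split_ifs <;> ring

-- B's fold invariant
theorem pv_foldB (a b : List Char) (n : Nat) (s k : Int) :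
    (List.range n).foldl
      (fun (p : Int × Int) i =>
        let mm := if a.getD i ' ' ≠ b.getD i ' ' then p.2 + 1 else p.2
        (p.1 + mm, mm)) (s, k)
    = (s + (n : Int) * k + pvG a b (n : Int) n, k + pvK a b n) := by
  induction n generalizing s k with
  | zero => simp [pvG, pvK]
  | succ n ih =>
    rw [List.range_succ, List.foldl_append, ih]
    have hK : pvK a b (n + 1) = pvK a b n + (if a.getD n ' ' ≠ b.getD n ' ' then (1 : Int) else 0) := by
      unfold pvK; rw [List.range_succ]; simp
    have hG : pvG a b ((n : Int) + 1) (n + 1) = pvG a b (n : Int) n + pvK a b (n + 1) := pvG_succ a b n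
    simp only [List.foldl_cons, List.foldl_nil]
    have hcast : (((n : Nat) + 1 : Nat) : Int) = (n : Int) + 1 := by push_cast; ring
    rw [Prod.mk.injEq]
    constructor
    · rw [hcast, hG, hK]; split_ifs <;> ring
    · rw [hK]; split_ifs <;> ring

theorem score_ans_eq (cal_answer target_ans : String) :
    score_ans cal_answer target_ans = score_ans_alt cal_answer target_ans := by
  unfold score_ans score_ans_alt
  simp only []
  set a := cal_answer.toList
  set b := target_ans.toList
  have hmin : (if a.length < b.length then a.length else b.length) = Nat.min a.length b.length := by
    rcases Nat.lt_or_ge a.length b.length with h | h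
    · simp [h, Nat.le_of_lt h]
    · have : ¬ a.length < b.length := Nat.not_lt.mpr h
      simp [Nat.min_def, this]
      omega
  rw [hmin, pv_foldA, pv_foldB]
  simp [pvG]

-- ===== VERDICT (by name: the statement is the Claim_ definition above) =====
theorem score_ans_spec : Claim_equal_score_ans := by
  intro c t _
  unfold Spec_score_ans
  exact score_ans_eq c t
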